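-- pv_equiv track=rewrite | github.com/SamGekko/model_2 | main.py | period
-- ===== SOURCE A (Python) =====
-- def period(x: list):
--     per = 0
--     for k1 in range(len(x) - 1):
--         for k2 in range(k1 + 1, len(x)):
--             if (x[k1] == x[k2]) & (k1 != k2):
--                 per = k2 - k1
--                 return per
--     if per == 0:
--         return None
-- ===== SOURCE B (Python) =====
-- def period(x: list):
--     # One pass: group the indices of each value; dict preserves first-occurrence
--     # order, so the first value with >= 2 indices is the earliest-recurring one.
--     occ = {}
--     for i, v in enumerate(x):
--         occ.setdefault(v, []).append(i)
--     for idxs in occ.values():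
--         if len(idxs) >= 2:
--             return idxs[1] - idxs[0]
--     return None
-- ===== Notes on version B (the rewrite author's own statement) =====
-- stated objective: alternative
-- what changed: Replaces the nested index-pair scan with a single pass that groups each value's indices in an insertion-ordered dict, then returns the gap of the first value (in first-occurrence order) with two occurrences.
import Mathlib
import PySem

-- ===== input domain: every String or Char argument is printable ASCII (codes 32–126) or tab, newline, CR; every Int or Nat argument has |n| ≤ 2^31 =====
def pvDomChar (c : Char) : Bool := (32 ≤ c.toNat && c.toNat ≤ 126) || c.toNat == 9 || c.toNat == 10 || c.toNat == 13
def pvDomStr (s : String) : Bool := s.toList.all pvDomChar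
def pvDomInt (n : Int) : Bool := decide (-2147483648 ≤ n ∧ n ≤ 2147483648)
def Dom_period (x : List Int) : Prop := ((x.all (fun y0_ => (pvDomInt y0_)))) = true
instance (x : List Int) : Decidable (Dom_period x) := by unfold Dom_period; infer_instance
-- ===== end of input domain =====

-- B replaces A's quadratic nested index scan by one pass that groups the indices of each value
-- in a dict (first-occurrence order), then reads off the first value with two occurrences.

-- ===== PORT A =====
-- inner loop: for k2 in range(k1+1, len(x)): if (x[k1] == x[k2]) & (k1 != k2): per = k2-k1; return per
def periodInner (x : List Int) (k1 : Int) : List Int → Option Int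
  | [] => none
  | k2 :: ks =>
      if PySem.List.pyGet? x k1 = PySem.List.pyGet? x k2 ∧ k1 ≠ k2
      then some (k2 - k1)
      else periodInner x k1 ks

-- outer loop: for k1 in range(len(x) - 1); falling through reaches 'return None' (per is still 0)
def periodOuter (x : List Int) : List Int → Option Int
  | [] => none
  | k1 :: ks =>
      match periodInner x k1 (PySem.List.pyRange (k1 + 1) (x.length : Int) 1) with
      | some r => some r
      | none => periodOuter x ks

def period (x : List Int) : Option Int :=
  periodOuter x (PySem.List.pyRange 0 ((x.length : Int) - 1) 1)

-- ===== PORT B =====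
-- B's second loop: for idxs in occ.values(): if len(idxs) >= 2: return idxs[1] - idxs[0]
def periodScan : List (List Int) → Option Int
  | [] => none
  | idxs :: rest =>
      if 2 ≤ idxs.length
      then some (PySem.List.pyGetD idxs 1 0 - PySem.List.pyGetD idxs 0 0)
      else periodScan rest

-- B's first loop: for i, v in enumerate(x): occ.setdefault(v, []).append(i)
def period_alt (x : List Int) : Option Int :=
  let occ : PySem.Dict Int (List Int) :=
    (PySem.List.enumerate x).foldl
      (fun d p => d.modify p.2 [] (fun l => l ++ [p.1])) PySem.Dict.empty
  periodScan occ.values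

-- ===== PRECONDITION & SPEC =====
def Spec_period (x : List Int) (out : Option Int) : Prop := out = period_alt x
instance (x : List Int) (out : Option Int) : Decidable (Spec_period x out) := by unfold Spec_period; infer_instance

-- ===== CLAIM (what is proved, stated in full; the proofs are below) =====
def Claim_equal_period : Prop := ∀ (x : List Int), Dom_period x → Spec_period x (period x)

-- ===== LEMMAS AND PROOFS =====

-- reference recursion: gap from the first index whose value recurs to its next occurrence
def aSpec : List Int → Option Int
  | [] => none
  | v :: rest =>
      match rest.findIdx? (fun w => w == v) with
      | some j => some ((j : Int) + 1)
      | none => aSpec rest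

-- the indices (counted from offset s) at which v occurs in x
def FIdx (x : List Int) (s : Int) (v : Int) : List Int :=
  ((PySem.List.enumerate x s).filter (fun p => p.2 == v)).map (·.1)

-- B's scan expressed over the list of dict keys
def bScan (x : List Int) : List Int → Option Int
  | [] => none
  | v :: ks =>
      if 2 ≤ (FIdx x 0 v).length
      then some (PySem.List.pyGetD (FIdx x 0 v) 1 0 - PySem.List.pyGetD (FIdx x 0 v) 0 0)
      else bScan x ks

lemma FIdx_cons (w : Int) (l : List Int) (s v : Int) :
    FIdx (w :: l) s v = if w = v then s :: FIdx l (s + 1) v else FIdx l (s + 1) v := by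
  simp [FIdx, PySem.List.enumerate_cons]
  split_ifs <;> simp_all

lemma FIdx_shift (l : List Int) (s v : Int) :
    FIdx l s v = (FIdx l 0 v).map (fun t => t + s) := by
  induction l generalizing s with
  | nil => rfl
  | cons w l ih =>
    rw [FIdx_cons, FIdx_cons, ih (s+1), ih (0+1)]
    split_ifs <;> simp [List.map_map, Function.comp_def] <;> intros <;> omega

lemma FIdx_eq_nil_iff (l : List Int) (s v : Int) : FIdx l s v = [] ↔ v ∉ l := by
  induction l generalizing s with
  | nil => simp [FIdx]
  | cons w l ih =>
    rw [FIdx_cons]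
    split_ifs with h <;> simp [h, ih] <;> tauto

lemma FIdx_head (l : List Int) (s v : Int) :
    (FIdx l s v).head? = (l.findIdx? (fun w => w == v)).map (fun j => s + (j : Int)) := by
  induction l generalizing s with
  | nil => simp [FIdx]
  | cons w l ih =>
    by_cases h : w = v
    · simp [FIdx_cons, h, List.findIdx?_cons]
    · simp [FIdx_cons, h, List.findIdx?_cons, ih (s+1)]
      cases hfi : l.findIdx? (fun w => w == v) <;> simp <;> omega

lemma bScan_shift (v : Int) (rest : List Int) (hv : v ∉ rest) :
    ∀ keys : List Int, (∀ w ∈ keys, w ∈ rest) → bScan (v :: rest) keys = bScan rest keys := by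
  intro keys hk
  induction keys with
  | nil => rfl
  | cons w ks ih =>
    have hwv : w ≠ v := fun h => hv (h ▸ hk w (by simp))
    have hF : FIdx (v :: rest) 0 w = (FIdx rest 0 w).map (fun t => t + 1) := by
      rw [FIdx_cons]; simp [Ne.symm hwv]
      exact FIdx_shift rest 1 w
    rw [bScan, bScan, hF]
    have hlen : ((FIdx rest 0 w).map (fun t => t + 1)).length = (FIdx rest 0 w).length := by simp
    rw [hlen]
    split_ifs with h2
    · obtain ⟨a, b, t, hab⟩ : ∃ a b t, FIdx rest 0 w = a :: b :: t := by
        match hF2 : FIdx rest 0 w, h2 with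
        | a :: b :: t, _ => exact ⟨a, b, t, rfl⟩
      rw [hab]
      simp [PySem.List.pyGetD]
    · exact ih (fun u hu => hk u (by simp [hu]))

lemma discard_of_not_mem (s : List Int) (v : Int) (hv : v ∉ s) : PySem.Set.discard s v = s := by
  induction s with
  | nil => rfl
  | cons w t ih => simp_all [PySem.Set.discard]; exact fun h => hv.1 h.symm

lemma bScan_ofList (x : List Int) : bScan x (PySem.Set.ofList x) = aSpec x := by
  induction x with
  | nil => rfl
  | cons v rest ih =>
    rw [PySem.Set.ofList_cons, bScan]
    have hFv : FIdx (v :: rest) 0 v = 0 :: FIdx rest 1 v := by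
      rw [FIdx_cons]; norm_num
    by_cases hv : v ∈ rest
    · have hne : FIdx rest 1 v ≠ [] := by rw [Ne, FIdx_eq_nil_iff]; simpa
      obtain ⟨a, t, hat⟩ := List.exists_cons_of_ne_nil hne
      have hh := FIdx_head rest 1 v
      rw [hat] at hh
      cases hfi : rest.findIdx? (fun w => w == v) with
      | none => rw [hfi] at hh; simp at hh
      | some j =>
        rw [hfi] at hh; simp at hh
        rw [hFv, hat]
        simp [aSpec, hfi, PySem.List.pyGetD]
        omega
    · have hnil : FIdx rest 1 v = [] := (FIdx_eq_nil_iff rest 1 v).mpr hv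
      rw [hFv, hnil]
      simp only [List.length_singleton]
      norm_num
      rw [discard_of_not_mem _ _ (by simpa [PySem.Set.mem_ofList] using hv)]
      rw [bScan_shift v rest hv _ (fun w hw => (PySem.Set.mem_ofList _ _).mp hw), ih]
      have hfi : rest.findIdx? (fun w => w == v) = none := by
        simp [List.findIdx?_eq_none_iff]
        intro a ha h; exact hv (h ▸ ha)
      simp [aSpec, hfi]

lemma periodScan_map (x : List Int) (keys : List Int) :
    periodScan (keys.map (fun v => FIdx x 0 v)) = bScan x keys := by
  induction keys with
  | nil => rfl
  | cons v ks ih => simp [periodScan, bScan, ih]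

lemma period_alt_eq (x : List Int) : period_alt x = aSpec x := by
  rw [period_alt]
  have hfold : (PySem.List.enumerate x).foldl
      (fun d p => d.modify p.2 [] (fun l => l ++ [p.1])) (PySem.Dict.empty : PySem.Dict Int (List Int))
      = ((PySem.List.enumerate x).map (fun p => (p.2, p.1))).foldl
          (fun d p => d.modify p.1 [] (fun l => l ++ [p.2])) PySem.Dict.empty := by
    rw [List.foldl_map]
  set sw := (PySem.List.enumerate x).map (fun p => (p.2, p.1)) with hsw
  set occ := sw.foldl (fun d p => d.modify p.1 [] (fun l => l ++ [p.2])) (PySem.Dict.empty : PySem.Dict Int (List Int)) with hocc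
  have hnd : occ.keys.Nodup := by
    apply PySem.Dict.nodup_keys_foldl_modify_key
    simp
  have hkeys : occ.keys = PySem.Set.ofList x := by
    rw [hocc]
    rw [PySem.Dict.keys_foldl_modify_key]
    simp [hsw, List.map_map, Function.comp_def, PySem.List.map_snd_enumerate, PySem.Set.update_nil_left]
  have hget : ∀ v, occ.getD v [] = FIdx x 0 v := by
    intro v
    rw [hocc, PySem.Dict.getD_foldl_modify_append]
    simp [hsw, FIdx, List.filter_map]
    rfl
  have hvals : occ.values = (PySem.Set.ofList x).map (fun v => FIdx x 0 v) := by
    rw [PySem.Dict.values_eq_map_keys occ hnd []]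
    rw [hkeys]
    exact List.map_congr_left (fun v _ => hget v)
  simp only [hfold, ← hocc, hvals, periodScan_map, bScan_ofList]

lemma innerLoop (x : List Int) (v : Int) (i : Nat) (hv : x[i]? = some v) :
    ∀ (l : List Int) (m : Nat), i < m → x.drop m = l →
      periodInner x (i : Int) (PySem.List.pyRange (m : Int) (x.length : Int) 1)
        = (l.findIdx? (fun w => w == v)).map (fun j => ((m : Int) + (j : Int)) - (i : Int)) := by
  intro l
  induction l with
  | nil =>
    intro m _ hd
    rw [List.drop_eq_nil_iff] at hd
    rw [PySem.List.pyRange_one_eq_nil (by exact_mod_cast hd)]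
    rfl
  | cons w l' ih =>
    intro m him hd
    have hm : m < x.length := by
      by_contra h
      rw [List.drop_eq_nil_iff.mpr (by omega)] at hd
      simp at hd
    have hw : x[m]? = some w := by
      have h0 : (x.drop m)[0]? = some w := by rw [hd]; rfl
      rw [List.getElem?_drop] at h0
      simpa using h0
    rw [PySem.List.pyRange_one_cons (by exact_mod_cast hm), periodInner]
    have hg : PySem.List.pyGet? x (i : Int) = some v := by simp [pysem, hv]
    have hg2 : PySem.List.pyGet? x (m : Int) = some w := by simp [pysem, hw]
    rw [List.findIdx?_cons]
    by_cases hvw : w = v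
    · rw [if_pos (by simp [hg, hg2, hvw]; omega)]
      simp [hvw]
    · rw [if_neg (by simp [hg, hg2]; intro h; exact absurd h.symm hvw)]
      have : ((m : Int) + 1) = ((m + 1 : Nat) : Int) := by push_cast; ring
      rw [this, ih (m + 1) (by omega) (by rw [← List.tail_drop, hd]; rfl)]
      simp [hvw]
      cases l'.findIdx? (fun w => w == v) <;> simp <;> omega

lemma outerLoop (x : List Int) :
    ∀ (l : List Int) (m : Nat), x.drop m = l →
      periodOuter x (PySem.List.pyRange (m : Int) ((x.length : Int) - 1) 1) = aSpec l := by
  intro l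
  induction l with
  | nil =>
    intro m hd
    rw [List.drop_eq_nil_iff] at hd
    rw [PySem.List.pyRange_one_eq_nil (by omega)]
    rfl
  | cons v rest ih =>
    intro m hd
    have hm : m < x.length := by
      by_contra h
      rw [List.drop_eq_nil_iff.mpr (by omega)] at hd
      simp at hd
    have hv : x[m]? = some v := by
      have h0 : (x.drop m)[0]? = some v := by rw [hd]; rfl
      rw [List.getElem?_drop] at h0
      simpa using h0
    have hdrest : x.drop (m + 1) = rest := by rw [← List.tail_drop, hd]; rfl
    by_cases hlast : m + 1 < x.length
    · rw [PySem.List.pyRange_one_cons (by push_cast; omega), periodOuter]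
      have hcast : ((m : Int) + 1) = ((m + 1 : Nat) : Int) := by push_cast; ring
      rw [hcast, innerLoop x v m hv rest (m + 1) (by omega) hdrest]
      rw [aSpec]
      cases hfi : rest.findIdx? (fun w => w == v) with
      | some j => simp; omega
      | none => simpa using ih (m + 1) hdrest
    · have hrest : rest = [] := by
        rw [← hdrest, List.drop_eq_nil_iff]; omega
      rw [PySem.List.pyRange_one_eq_nil (by omega)]
      simp [aSpec, hrest]
      rfl

lemma period_eq (x : List Int) : period x = aSpec x := by
  have h := outerLoop x x 0 (by simp)
  simpa [period] using h

-- ===== VERDICT (by name: the statement is the Claim_ definition above) =====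
theorem period_spec : Claim_equal_period := by
  intro x _
  unfold Spec_period
  rw [period_eq, period_alt_eq]
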